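-- pv_equiv track=rewrite | github.com/AlexGenuin0/radargraph | timedate.py | lhoras
-- ===== SOURCE A (Python) =====
-- def lhoras(mr):
--     h, m = 0, 0
--     horas = []
--     for i in range(len(mr)):
--         if i % 12 == 0 and i != 0: h += 1
--         if h < 10:
--             if m < 10:
--                 horas.append('0{}:0{}'.format(h, m))
--             elif m > 9:
--                 horas.append('0{}:{}'.format(h, m))
--         elif h > 9:
--             if m < 10:
--                 horas.append('{}:0{}'.format(h, m))
--             elif m > 9:
--                 horas.append('{}:{}'.format(h, m))
--
--         if m >= 55:
--             m = 0
--         else: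
--             m += 5
--
--     return horas
-- ===== SOURCE B (Python) =====
-- def lhoras(mr):
--     return [f'{i // 12:02d}:{(i % 12) * 5:02d}' for i in range(len(mr))]
-- ===== Notes on version B (the rewrite author's own statement) =====
-- stated objective: simpler
-- what changed: Replaces the running h/m accumulators with their increment/reset branches and the four-way zero-padding case split by a single list comprehension computing hour=i//12 and minute=(i%12)*5 in closed form and formatting with :02d.
import Mathlib
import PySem

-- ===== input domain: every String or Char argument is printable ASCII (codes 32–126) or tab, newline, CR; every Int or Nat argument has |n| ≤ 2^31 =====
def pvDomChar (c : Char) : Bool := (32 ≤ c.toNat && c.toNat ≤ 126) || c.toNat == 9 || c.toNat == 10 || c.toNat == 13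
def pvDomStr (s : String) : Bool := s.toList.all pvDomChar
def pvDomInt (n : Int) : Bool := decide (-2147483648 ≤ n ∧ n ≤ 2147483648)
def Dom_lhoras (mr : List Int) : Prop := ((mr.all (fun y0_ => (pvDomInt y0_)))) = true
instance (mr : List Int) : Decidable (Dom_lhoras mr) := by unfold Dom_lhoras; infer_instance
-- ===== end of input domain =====

-- B replaces A's running h/m accumulators (with reset/increment branches and a
-- four-way padding case split) by closed-form arithmetic i//12, (i%12)*5 per index. Objective: simpler.

-- ===== PORT A =====
-- one iteration of A's for-loop over index i, state (h, m, horas)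
def lhorasStep (st : Int × Int × List String) (i : Nat) : Int × Int × List String :=
  let h := if i % 12 == 0 && i != 0 then st.1 + 1 else st.1
  let m := st.2.1
  let horas :=
    if h < 10 then
      if m < 10 then st.2.2 ++ ["0" ++ PySem.Int.toStr h ++ ":0" ++ PySem.Int.toStr m]
      else if m > 9 then st.2.2 ++ ["0" ++ PySem.Int.toStr h ++ ":" ++ PySem.Int.toStr m]
      else st.2.2
    else if h > 9 then
      if m < 10 then st.2.2 ++ [PySem.Int.toStr h ++ ":0" ++ PySem.Int.toStr m]
      else if m > 9 then st.2.2 ++ [PySem.Int.toStr h ++ ":" ++ PySem.Int.toStr m]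
      else st.2.2
    else st.2.2
  let m' := if m ≥ 55 then 0 else m + 5
  (h, m', horas)

def lhoras (mr : List Int) : List String :=
  ((List.range mr.length).foldl lhorasStep (0, 0, [])).2.2

-- ===== PORT B =====
-- f'{n:02d}' for a nonnegative int n
def pad2 (n : Int) : String := if n < 10 then "0" ++ PySem.Int.toStr n else PySem.Int.toStr n

def lhoras_alt (mr : List Int) : List String :=
  (List.range mr.length).map
    (fun i : Nat => pad2 (PySem.Int.floordiv (i : Int) 12) ++ ":" ++ pad2 (PySem.Int.mod (i : Int) 12 * 5))

-- ===== PRECONDITION & SPEC =====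
def Spec_lhoras (mr : List Int) (out : List String) : Prop := out = lhoras_alt mr
instance (mr : List Int) (out : List String) : Decidable (Spec_lhoras mr out) := by unfold Spec_lhoras; infer_instance

-- ===== CLAIM (what is proved, stated in full; the proofs are below) =====
def Claim_equal_lhoras : Prop := ∀ (mr : List Int), Dom_lhoras mr → Spec_lhoras mr (lhoras mr)

-- ===== LEMMAS AND PROOFS =====

-- the element B emits at index i, in Nat arithmetic
def fB (i : Nat) : String := pad2 ((i / 12 : Nat)) ++ ":" ++ pad2 ((i % 12 * 5 : Nat))

lemma fB_eq (i : Nat) :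
    pad2 (PySem.Int.floordiv (i : Int) 12) ++ ":" ++ pad2 (PySem.Int.mod (i : Int) 12 * 5) = fB i := by
  simp [fB]

-- incoming h at the start of iteration s
def hIn : Nat → Int
  | 0 => 0
  | s + 1 => ((s / 12 : Nat) : Int)

lemma hIn_succ_eq (s : Nat) :
    (if s % 12 == 0 && s != 0 then hIn s + 1 else hIn s) = hIn (s + 1) := by
  cases s with
  | zero => simp [hIn]
  | succ t =>
    by_cases h : (t + 1) % 12 = 0
    · simp only [hIn, h, beq_self_eq_true, Bool.true_and]
      have h2 : (t + 1 != 0) = true := by simp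
      rw [h2, if_pos rfl]
      omega
    · have h2 : ((t + 1) % 12 == 0) = false := by simpa using h
      simp only [hIn, h2, Bool.false_and, Bool.false_eq_true, if_false]
      omega

lemma step_string (h m : Int) (hm0 : 0 ≤ m) (hm1 : m ≤ 55) :
    (if h < 10 then
      if m < 10 then ["0" ++ PySem.Int.toStr h ++ ":0" ++ PySem.Int.toStr m]
      else if m > 9 then ["0" ++ PySem.Int.toStr h ++ ":" ++ PySem.Int.toStr m]
      else []
    else if h > 9 then
      if m < 10 then [PySem.Int.toStr h ++ ":0" ++ PySem.Int.toStr m]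
      else if m > 9 then [PySem.Int.toStr h ++ ":" ++ PySem.Int.toStr m]
      else []
    else []) = [pad2 h ++ ":" ++ pad2 m] := by
  unfold pad2
  split_ifs with c1 c2 c3 c4 c5 c6 <;> try omega
  all_goals
    refine congrArg (fun s => [s]) (String.toList_inj.mp ?_)
  all_goals simp [String.toList_append]

lemma loop_inv (n : Nat) : ∀ (s : Nat) (acc : List String),
    (List.range' s n).foldl lhorasStep (hIn s, ((s % 12 * 5 : Nat) : Int), acc)
      = (hIn (s + n), (((s + n) % 12 * 5 : Nat) : Int), acc ++ (List.range' s n).map fB) := by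
  induction n with
  | zero => intro s acc; simp
  | succ k ih =>
    intro s acc
    rw [List.range'_succ]
    simp only [List.foldl_cons, List.map_cons]
    have hstep : lhorasStep (hIn s, ((s % 12 * 5 : Nat) : Int), acc) s
        = (hIn (s + 1), (((s + 1) % 12 * 5 : Nat) : Int), acc ++ [fB s]) := by
      unfold lhorasStep
      simp only [hIn_succ_eq]
      refine Prod.ext rfl (Prod.ext ?_ ?_)
      · -- new m
        simp only
        split_ifs with hc
        · have : (s + 1) % 12 = 0 := by omega
          simp [this]
        · have : (s + 1) % 12 = s % 12 + 1 := by omega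
          rw [this]; push_cast; ring
      · -- appended string
        simp only
        have hs := step_string (hIn (s+1)) ((s % 12 * 5 : Nat) : Int)
          (by positivity)
          (by have h55 : s % 12 * 5 ≤ 55 := by omega
              exact_mod_cast h55)
        have hfb : pad2 (hIn (s+1)) ++ ":" ++ pad2 ((s % 12 * 5 : Nat) : Int) = fB s := by
          unfold fB hIn
          norm_cast
        rw [hfb] at hs
        split_ifs at hs ⊢ <;> simp_all
    rw [hstep, ih (s + 1)]
    have h1 : s + 1 + k = s + (k + 1) := by omega
    rw [h1]
    simp

-- ===== VERDICT (by name: the statement is the Claim_ definition above) =====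
theorem lhoras_spec : Claim_equal_lhoras := by
  intro mr _
  unfold Spec_lhoras lhoras lhoras_alt
  have h0 : (List.range mr.length) = List.range' 0 mr.length := by
    simp [List.range_eq_range']
  rw [h0]
  have h1 : ((0:Int), (0:Int), ([] : List String))
      = (hIn 0, ((0 % 12 * 5 : Nat) : Int), ([] : List String)) := by simp [hIn]
  rw [h1, loop_inv]
  simp only [List.nil_append]
  apply List.map_congr_left
  intro i _
  exact (fB_eq i).symm
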